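-- pv_equiv track=rewrite | github.com/abelvanbergen/AdventofCode | 2016/day10/ex02.py | get_number
-- ===== SOURCE A (Python) =====
-- def get_number(pos, line):
-- 	i = 0
-- 	count = 1
-- 	while 1:
-- 		while line[i] < '0'  or line[i] > '9':
-- 			i += 1
-- 		if count == pos:
-- 			break
-- 		count += 1
-- 		while line[i] >= '0' and line[i] <= '9':
-- 			i += 1
-- 	j = 0
-- 	while i + j != len(line) and (line[i + j] >= '0' and line[i + j] <= '9'):
-- 		j += 1
-- 	return (int(line[i:i + j]))
--
-- i = 0
-- ===== SOURCE B (Python) =====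
-- def get_number(pos, line):
--     # One pass: split the line into its maximal digit runs, then index directly.
--     runs = []
--     prev = False
--     for ch in line:
--         digit = '0' <= ch <= '9'
--         if digit:
--             if prev:
--                 runs[-1] += ch
--             else:
--                 runs.append(ch)
--         prev = digit
--     if 1 <= pos <= len(runs):
--         return int(runs[pos - 1])
--     raise IndexError('no number #%d in line' % pos)
-- ===== Notes on version B (the rewrite author's own statement) =====
-- stated objective: simpler
-- what changed: A hunts for the pos-th number with an outer while-1 loop and three on-demand index-stepping inner scans plus a final slice-and-int; B makes one uniform left-to-right pass that splits the line into its maximal digit runs and then indexes the pos-th run directly.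
import Mathlib
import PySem

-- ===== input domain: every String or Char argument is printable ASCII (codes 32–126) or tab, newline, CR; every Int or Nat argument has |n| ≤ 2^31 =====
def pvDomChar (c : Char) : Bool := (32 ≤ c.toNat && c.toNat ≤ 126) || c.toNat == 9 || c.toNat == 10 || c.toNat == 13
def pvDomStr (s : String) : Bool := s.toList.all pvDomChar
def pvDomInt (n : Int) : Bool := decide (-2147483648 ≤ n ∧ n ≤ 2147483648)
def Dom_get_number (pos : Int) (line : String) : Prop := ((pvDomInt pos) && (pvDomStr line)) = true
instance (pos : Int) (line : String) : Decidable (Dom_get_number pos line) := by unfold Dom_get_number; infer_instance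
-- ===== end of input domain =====

-- B replaces A's on-demand nested index scans by a single left-to-right pass that splits
-- the line into its maximal digit runs and then indexes the pos-th run directly (objective: simpler).

-- ===== PORT A =====
-- inner loop `while line[i] < '0' or line[i] > '9': i += 1` (none = Python IndexError, outside Pre_)
def pvSkipND (l : List Char) (i : Nat) : Nat :=
  match h : l[i]? with
  | some c => if c < '0' ∨ '9' < c then pvSkipND l (i + 1) else i
  | none => i
termination_by l.length - i
decreasing_by
  have : i < l.length := (List.getElem?_eq_some_iff.mp h).1
  omega

-- inner loop `while line[i] >= '0' and line[i] <= '9': i += 1` (none = Python IndexError, outside Pre_)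
def pvSkipD (l : List Char) (i : Nat) : Nat :=
  match h : l[i]? with
  | some c => if '0' ≤ c ∧ c ≤ '9' then pvSkipD l (i + 1) else i
  | none => i
termination_by l.length - i
decreasing_by
  have : i < l.length := (List.getElem?_eq_some_iff.mp h).1
  omega

-- `while i + j != len(line) and (line[i+j] >= '0' and line[i+j] <= '9'): j += 1`
-- (here i + j never exceeds len(line), so `i + j != len(line)` is exactly the in-range test)
def pvCountJ (l : List Char) (i j : Nat) : Nat :=
  match h : l[i + j]? with
  | some c => if '0' ≤ c ∧ c ≤ '9' then pvCountJ l i (j + 1) else j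
  | none => j
termination_by l.length - (i + j)
decreasing_by
  have : i + j < l.length := (List.getElem?_eq_some_iff.mp h).1
  omega

-- the outer `while 1` loop; the `else 0` arm is where Python loops on to an IndexError (outside Pre_)
def pvAMain (l : List Char) (pos : Int) (i : Nat) (count : Int) : Int :=
  let i' := pvSkipND l i
  if count = pos then
    let j := pvCountJ l i' 0
    (PySem.Int.ofChars? ((l.drop i').take j)).getD 0   -- int(line[i:i+j])
  else if count < pos then
    pvAMain l pos (pvSkipD l i') (count + 1)
  else 0
termination_by (pos - count).toNat
decreasing_by omega

def get_number (pos : Int) (line : String) : Int :=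
  pvAMain line.toList pos 0 1

-- ===== PORT B =====
-- `runs[-1] += ch`
def pvUpdLast (rs : List (List Char)) (c : Char) : List (List Char) :=
  match rs with
  | [] => []
  | [r] => [r ++ [c]]
  | r :: t => r :: pvUpdLast t c

-- one iteration of B's for-loop; state = (runs, prev)
def pvBStep (st : List (List Char) × Bool) (c : Char) : List (List Char) × Bool :=
  if '0' ≤ c ∧ c ≤ '9' then
    if st.2 then (pvUpdLast st.1 c, true) else (st.1 ++ [[c]], true)
  else (st.1, false)

def get_number_alt (pos : Int) (line : String) : Int :=
  let st := line.toList.foldl pvBStep ([], false)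
  if 1 ≤ pos ∧ pos ≤ (st.1.length : Int) then
    (PySem.Int.ofChars? (st.1.getD (pos - 1).toNat [])).getD 0   -- int(runs[pos-1])
  else 0   -- Python: raise IndexError (outside Pre_)

-- ===== PRECONDITION & SPEC =====
-- the maximal digit runs of a line (spec-level characterisation used by Pre_)
def pvDg (c : Char) : Bool := decide (('0' : Char) ≤ c ∧ c ≤ '9')

def pvRuns : List Char → List (List Char)
  | [] => []
  | c :: t =>
    if pvDg c then
      if t.head?.elim false pvDg then
        match pvRuns t with
        | r :: rest => (c :: r) :: rest
        | [] => [[c]]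
      else [c] :: pvRuns t
    else pvRuns t

-- Pre_ is exactly where Python A returns: the line contains at least pos maximal digit
-- runs and pos ≥ 1; on every other input A raises IndexError (and B raises IndexError too).
def Pre_get_number (pos : Int) (line : String) : Prop :=
  1 ≤ pos ∧ pos ≤ ((pvRuns line.toList).length : Int)
instance (pos : Int) (line : String) : Decidable (Pre_get_number pos line) := by
  unfold Pre_get_number; infer_instance

def pvWitness_get_number : Int × String := (2, "bot 17 gives low to 5")

def Spec_get_number (pos : Int) (line : String) (out : Int) : Prop := out = get_number_alt pos line
instance (pos : Int) (line : String) (out : Int) : Decidable (Spec_get_number pos line out) := by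
  unfold Spec_get_number; infer_instance

-- ===== CLAIM (what is proved, stated in full; the proofs are below) =====
def Claim_equal_get_number : Prop := ∀ (pos : Int) (line : String), Dom_get_number pos line → Pre_get_number pos line → Spec_get_number pos line (get_number pos line)

-- ===== LEMMAS AND PROOFS =====

-- the branch tests of the ports, expressed through pvDg
theorem pvNotDg_iff (c : Char) : (c < '0' ∨ '9' < c) ↔ ¬ pvDg c = true := by
  simp only [pvDg, decide_eq_true_eq]
  constructor
  · rintro (h | h) ⟨h0, h9⟩
    · exact absurd h0 (not_le_of_gt h)
    · exact absurd h9 (not_le_of_gt h)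
  · intro h
    rcases le_or_gt '0' c with h0 | h0
    · rcases le_or_gt c '9' with h9 | h9
      · exact absurd ⟨h0, h9⟩ h
      · exact Or.inr h9
    · exact Or.inl h0

-- take of the takeWhile-prefix length is the takeWhile prefix
theorem pvTake_takeWhile (p : Char → Bool) (l : List Char) :
    l.take (l.takeWhile p).length = l.takeWhile p := by
  obtain ⟨t, ht⟩ := List.takeWhile_prefix (l := l) p
  nth_rewrite 2 [← ht]
  rw [List.take_left]

-- dropWhile = drop past the takeWhile prefix
theorem pvDropWhile_eq (p : Char → Bool) (s : List Char) :
    s.dropWhile p = s.drop (s.takeWhile p).length := by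
  conv_lhs => rw [← List.drop_left (l₁ := s.takeWhile p) (l₂ := s.dropWhile p)]
  rw [List.takeWhile_append_dropWhile]

theorem pvSkipND_eq (l : List Char) (i : Nat) :
    pvSkipND l i = i + ((l.drop i).takeWhile (fun c => !pvDg c)).length := by
  fun_induction pvSkipND l i with
  | case1 i c h hc ih =>
    have hi : i < l.length := (List.getElem?_eq_some_iff.mp h).1
    have hd : l.drop i = c :: l.drop (i+1) := by
      rw [List.drop_eq_getElem_cons hi]; simp [List.getElem?_eq_some_iff.mp h |>.2]
    have hnd : (!pvDg c) = true := by simpa using (pvNotDg_iff c).mp hc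
    rw [hd]
    simp [hnd, ih]
    omega
  | case2 i c h hc =>
    have hi : i < l.length := (List.getElem?_eq_some_iff.mp h).1
    have hd : l.drop i = c :: l.drop (i+1) := by
      rw [List.drop_eq_getElem_cons hi]; simp [List.getElem?_eq_some_iff.mp h |>.2]
    have hdg : pvDg c = true := by
      by_contra hx
      exact hc ((pvNotDg_iff c).mpr hx)
    simp [hd, hdg]
  | case3 i h =>
    have hle : l.length ≤ i := List.getElem?_eq_none_iff.mp h
    simp [List.drop_eq_nil_of_le hle]

theorem pvSkipD_eq (l : List Char) (i : Nat) :
    pvSkipD l i = i + ((l.drop i).takeWhile pvDg).length := by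
  fun_induction pvSkipD l i with
  | case1 i c h hc ih =>
    have hi : i < l.length := (List.getElem?_eq_some_iff.mp h).1
    have hd : l.drop i = c :: l.drop (i+1) := by
      rw [List.drop_eq_getElem_cons hi]; simp [List.getElem?_eq_some_iff.mp h |>.2]
    have hdg : pvDg c = true := by simp [pvDg, hc.1, hc.2]
    rw [hd]
    simp [hdg, ih]
    omega
  | case2 i c h hc =>
    have hi : i < l.length := (List.getElem?_eq_some_iff.mp h).1
    have hd : l.drop i = c :: l.drop (i+1) := by
      rw [List.drop_eq_getElem_cons hi]; simp [List.getElem?_eq_some_iff.mp h |>.2]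
    have hdg : ¬ pvDg c = true := by simpa [pvDg] using hc
    simp [hd, hdg]
  | case3 i h =>
    have hle : l.length ≤ i := List.getElem?_eq_none_iff.mp h
    simp [List.drop_eq_nil_of_le hle]

theorem pvCountJ_eq (l : List Char) (i j : Nat) :
    pvCountJ l i j = j + ((l.drop (i + j)).takeWhile pvDg).length := by
  fun_induction pvCountJ l i j with
  | case1 j c h hc ih =>
    have hi : i + j < l.length := (List.getElem?_eq_some_iff.mp h).1
    have hd : l.drop (i + j) = c :: l.drop (i + j + 1) := by
      rw [List.drop_eq_getElem_cons hi]; simp [List.getElem?_eq_some_iff.mp h |>.2]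
    have hdg : pvDg c = true := by simp [pvDg, hc.1, hc.2]
    have hij : i + (j + 1) = i + j + 1 := by omega
    rw [hij] at ih
    rw [hd]
    simp [hdg, ih]
    omega
  | case2 j c h hc =>
    have hi : i + j < l.length := (List.getElem?_eq_some_iff.mp h).1
    have hd : l.drop (i + j) = c :: l.drop (i + j + 1) := by
      rw [List.drop_eq_getElem_cons hi]; simp [List.getElem?_eq_some_iff.mp h |>.2]
    have hdg : ¬ pvDg c = true := by simpa [pvDg] using hc
    simp [hd, hdg]
  | case3 j h =>
    have hle : l.length ≤ i + j := List.getElem?_eq_none_iff.mp h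
    simp [List.drop_eq_nil_of_le hle]

-- a run that starts with a digit is that digit followed by the maximal digit run of the tail
theorem pvRuns_cons_digit (t : List Char) : ∀ (c : Char), pvDg c = true →
    pvRuns (c :: t) = (c :: t.takeWhile pvDg) :: pvRuns (t.dropWhile pvDg) := by
  induction t with
  | nil => intro c h; simp [pvRuns, h]
  | cons d t' ih =>
    intro c h
    by_cases hd : pvDg d = true
    · rw [pvRuns, ih d hd]
      simp [h, hd]
    · simp [pvRuns, h, hd]

-- dropping a non-digit prefix does not change the runs
theorem pvRuns_dropWhile (s : List Char) :
    pvRuns (s.dropWhile (fun c => !pvDg c)) = pvRuns s := by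
  induction s with
  | nil => rfl
  | cons c t ih =>
    by_cases hdg : pvDg c = true
    · simp [hdg]
    · simp [hdg, ih, pvRuns]

-- A's outer loop returns the (pos - count)-th run of the unscanned suffix
theorem pvAMain_eq (n : Nat) :
    ∀ (l : List Char) (pos : Int) (i : Nat) (count : Int),
      (pos - count).toNat = n → count ≤ pos → n < (pvRuns (l.drop i)).length →
      pvAMain l pos i count = (PySem.Int.ofChars? ((pvRuns (l.drop i)).getD n [])).getD 0 := by
  induction n with
  | zero =>
    intro l pos i count hn hle hlen
    have hdrop : l.drop (pvSkipND l i) = (l.drop i).dropWhile (fun c => !pvDg c) := by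
      rw [pvSkipND_eq, ← List.drop_drop]
      exact (pvDropWhile_eq _ _).symm
    have hruns : pvRuns (l.drop (pvSkipND l i)) = pvRuns (l.drop i) := by
      rw [hdrop, pvRuns_dropWhile]
    cases hs' : l.drop (pvSkipND l i) with
    | nil =>
      exfalso
      rw [← hruns, hs'] at hlen
      simp [pvRuns] at hlen
    | cons c t =>
      have hdw : (l.drop i).dropWhile (fun c => !pvDg c) = c :: t := by rw [← hdrop, hs']
      have hdgc : pvDg c = true := by
        have hne2 : (l.drop i).dropWhile (fun c => !pvDg c) ≠ [] := by simp [hdw]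
        have hh := List.head_dropWhile_not (fun c => !pvDg c) (l := l.drop i) hne2
        simp [hdw] at hh
        exact hh
      have hrcons : pvRuns (l.drop (pvSkipND l i)) = (c :: t.takeWhile pvDg) :: pvRuns (t.dropWhile pvDg) := by
        rw [hs']
        exact pvRuns_cons_digit t c hdgc
      have hcp : count = pos := by omega
      subst hcp
      rw [pvAMain]
      rw [pvCountJ_eq]
      simp only [Nat.add_zero, Nat.zero_add]
      rw [pvTake_takeWhile, ← hruns, hrcons, hs']
      simp [hdgc]
  | succ n ih =>
    intro l pos i count hn hle hlen
    have hdrop : l.drop (pvSkipND l i) = (l.drop i).dropWhile (fun c => !pvDg c) := by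
      rw [pvSkipND_eq, ← List.drop_drop]
      exact (pvDropWhile_eq _ _).symm
    have hruns : pvRuns (l.drop (pvSkipND l i)) = pvRuns (l.drop i) := by
      rw [hdrop, pvRuns_dropWhile]
    cases hs' : l.drop (pvSkipND l i) with
    | nil =>
      exfalso
      rw [← hruns, hs'] at hlen
      simp [pvRuns] at hlen
    | cons c t =>
      have hdw : (l.drop i).dropWhile (fun c => !pvDg c) = c :: t := by rw [← hdrop, hs']
      have hdgc : pvDg c = true := by
        have hne2 : (l.drop i).dropWhile (fun c => !pvDg c) ≠ [] := by simp [hdw]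
        have hh := List.head_dropWhile_not (fun c => !pvDg c) (l := l.drop i) hne2
        simp [hdw] at hh
        exact hh
      have hrcons : pvRuns (l.drop (pvSkipND l i)) = (c :: t.takeWhile pvDg) :: pvRuns (t.dropWhile pvDg) := by
        rw [hs']
        exact pvRuns_cons_digit t c hdgc
      have hlt : count < pos := by omega
      have hdrop2 : l.drop (pvSkipD l (pvSkipND l i)) = t.dropWhile pvDg := by
        rw [pvSkipD_eq, ← List.drop_drop, ← pvDropWhile_eq, hs']
        simp [hdgc]
      have hlen2 : n < (pvRuns (l.drop (pvSkipD l (pvSkipND l i)))).length := by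
        rw [hdrop2]
        rw [← hruns, hrcons] at hlen
        simpa using hlen
      rw [pvAMain]
      simp only [if_neg (by omega : ¬ count = pos), if_pos hlt]
      rw [ih l pos (pvSkipD l (pvSkipND l i)) (count + 1) (by omega) (by omega) hlen2]
      rw [hdrop2, ← hruns, hrcons]
      simp [List.getD]

theorem pvUpdLast_append (rs : List (List Char)) (r : List Char) (c : Char) :
    pvUpdLast (rs ++ [r]) c = rs ++ [r ++ [c]] := by
  induction rs with
  | nil => rfl
  | cons a as ih =>
    cases as with
    | nil => simp [pvUpdLast]
    | cons b bs => simpa [pvUpdLast] using ih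

theorem pvFoldB_run (ds : List Char) :
    ∀ (rs : List (List Char)) (r : List Char), (∀ c ∈ ds, pvDg c) →
      List.foldl pvBStep (rs ++ [r], true) ds = (rs ++ [r ++ ds], true) := by
  induction ds with
  | nil => simp
  | cons d ds ih =>
    intro rs r hall
    have hd : pvDg d = true := hall d (by simp)
    have hd' : ('0' ≤ d ∧ d ≤ '9') := by simpa [pvDg] using hd
    have hstep : pvBStep (rs ++ [r], true) d = (rs ++ [r ++ [d]], true) := by
      simp [pvBStep, hd', pvUpdLast_append]
    rw [List.foldl_cons, hstep, ih rs (r ++ [d]) (fun c hc => hall c (by simp [hc]))]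
    simp

theorem pvFoldB_main (n : Nat) :
    ∀ (l : List Char), l.length ≤ n →
      ∀ (rs : List (List Char)), (List.foldl pvBStep (rs, false) l).1 = rs ++ pvRuns l := by
  induction n with
  | zero =>
    intro l hl rs
    have : l = [] := List.eq_nil_of_length_eq_zero (by omega)
    subst this
    simp [pvRuns]
  | succ n ih =>
    intro l hl rs
    cases l with
    | nil => simp [pvRuns]
    | cons c t =>
      by_cases hdg : pvDg c = true
      · have hc' : ('0' ≤ c ∧ c ≤ '9') := by simpa [pvDg] using hdg
        have hstep : pvBStep (rs, false) c = (rs ++ [[c]], true) := by simp [pvBStep, hc']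
        rw [List.foldl_cons, hstep]
        conv_lhs => rw [← List.takeWhile_append_dropWhile (p := pvDg) (l := t)]
        rw [List.foldl_append,
          pvFoldB_run (t.takeWhile pvDg) rs [c] (fun x hx => List.mem_takeWhile_imp hx)]
        have hpr : pvRuns (c :: t) = (c :: t.takeWhile pvDg) :: pvRuns (t.dropWhile pvDg) :=
          pvRuns_cons_digit t c hdg
        rw [hpr]
        cases hr : t.dropWhile pvDg with
        | nil => simp [pvRuns]
        | cons c' t' =>
          have hc'f : pvDg c' = false := by
            have hne : t.dropWhile pvDg ≠ [] := by simp [hr]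
            have hh := List.head_dropWhile_not pvDg (l := t) hne
            simpa [hr] using hh
          have hc'2 : ¬ ('0' ≤ c' ∧ c' ≤ '9') := by simpa [pvDg] using hc'f
          rw [List.foldl_cons]
          have hstep2 : pvBStep (rs ++ [[c] ++ t.takeWhile pvDg], true) c'
              = (rs ++ [[c] ++ t.takeWhile pvDg], false) := by
            simp [pvBStep, hc'2]
          rw [hstep2]
          have hlen : t'.length ≤ n := by
            have h1 : (t.dropWhile pvDg).length ≤ t.length := List.length_dropWhile_le _ _
            rw [hr] at h1
            simp only [List.length_cons] at h1 hl
            omega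
          rw [ih t' hlen]
          have hpr2 : pvRuns (c' :: t') = pvRuns t' := by
            simp [pvRuns, hc'f]
          rw [← hpr2, ← hr]
          simp
      · have hc' : ¬ ('0' ≤ c ∧ c ≤ '9') := by simpa [pvDg] using hdg
        have hstep : pvBStep (rs, false) c = (rs, false) := by simp [pvBStep, hc']
        rw [List.foldl_cons, hstep, ih t (by simpa using Nat.le_of_succ_le_succ (by simpa using hl))]
        simp [pvRuns, hdg]

-- ===== VERDICT (by name: the statement is the Claim_ definition above) =====
theorem get_number_spec : Claim_equal_get_number := by
  intro pos line _hdom hpre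
  unfold Spec_get_number
  obtain ⟨h1, h2⟩ := hpre
  have hlen : (pos - 1).toNat < (pvRuns line.toList).length := by omega
  have hA : get_number pos line
      = (PySem.Int.ofChars? ((pvRuns line.toList).getD (pos - 1).toNat [])).getD 0 := by
    have h := pvAMain_eq (pos - 1).toNat line.toList pos 0 1 rfl h1 (by simpa using hlen)
    simpa [get_number] using h
  have hst : (List.foldl pvBStep ([], false) line.toList).1 = pvRuns line.toList := by
    simpa using pvFoldB_main line.toList.length line.toList le_rfl []
  have hB : get_number_alt pos line
      = (PySem.Int.ofChars? ((pvRuns line.toList).getD (pos - 1).toNat [])).getD 0 := by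
    simp only [get_number_alt]
    rw [hst, if_pos ⟨h1, by exact_mod_cast h2⟩]
  rw [hA, hB]
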